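-- pv_equiv track=rewrite | github.com/AlexStefanos/CoursMaster | L1/S1/Algo1/TP/TP7/exo2.py | mystere
-- ===== SOURCE A (Python) =====
-- def mystere(liste, elem):
--     """ List x Elem -> List
--     REtoure une lise contenant le nbre d'apparitions de l'élément dans la liste , l'indice de sa 1ere apparition et dernière apparition"""
--     resultat=[0, -1, -1]
--     for i in range(len(liste)):
--         if liste[i] == elem:
--             resultat[0] = resultat[0] + 1
--             resultat[2] = i
--             if resultat[1] == -1 :
--                 resultat[1]=i
--
--     return resultat
-- ===== SOURCE B (Python) =====
-- def mystere(liste, elem):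
--     """ List x Elem -> List
--     Same result as A: [count, first index, last index] with -1 indices when absent."""
--     if elem not in liste:
--         return [0, -1, -1]
--     return [liste.count(elem),
--             liste.index(elem),
--             len(liste) - 1 - liste[::-1].index(elem)]
-- ===== Notes on version B (the rewrite author's own statement) =====
-- stated objective: simpler
-- what changed: The single fused loop maintaining a three-field accumulator is replaced by a membership guard plus three independent library scans (count, first index, and last index via the reversed list), with the last index recovered by the len-1-reverse-index offset.
import Mathlib
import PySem

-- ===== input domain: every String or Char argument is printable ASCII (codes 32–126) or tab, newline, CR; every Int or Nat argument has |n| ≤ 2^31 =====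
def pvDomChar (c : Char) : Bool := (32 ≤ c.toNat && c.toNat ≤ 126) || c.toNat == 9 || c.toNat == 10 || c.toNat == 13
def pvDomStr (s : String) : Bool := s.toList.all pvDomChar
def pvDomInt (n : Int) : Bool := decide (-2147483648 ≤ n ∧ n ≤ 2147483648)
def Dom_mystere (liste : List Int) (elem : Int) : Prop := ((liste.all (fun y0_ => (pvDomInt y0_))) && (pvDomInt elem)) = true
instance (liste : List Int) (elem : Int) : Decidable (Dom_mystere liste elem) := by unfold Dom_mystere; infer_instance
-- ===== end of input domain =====

-- B replaces A's single fused accumulator loop by a membership guard plus three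
-- independent library scans (count / first index / reverse index): simpler decomposition.

-- ===== PORT A =====
-- A: resultat = [0,-1,-1]; for i in range(len(liste)): if liste[i]==elem: update all three fields.
def mystere (liste : List Int) (elem : Int) : List Int :=
  let r := (PySem.List.pyRange 0 (PySem.List.len liste) 1).foldl
      (fun (resultat : Int × Int × Int) i =>
        if PySem.List.pyGetD liste i 0 = elem then
          (resultat.1 + 1, (if resultat.2.1 = -1 then i else resultat.2.1), i)
        else resultat)
      (0, -1, -1)
  [r.1, r.2.1, r.2.2]

-- ===== PORT B =====
-- B: guard `elem not in liste`, then liste.count, liste.index and len-1-liste[::-1].index.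
-- liste[::-1] is ported as liste.reverse (PySem.List.slice?_none_none_neg_one).
def mystere_alt (liste : List Int) (elem : Int) : List Int :=
  if elem ∈ liste then
    [ (PySem.List.count liste elem : Int),
      (((PySem.List.index? liste elem).getD 0 : Nat) : Int),
      PySem.List.len liste - 1 - (((PySem.List.index? liste.reverse elem).getD 0 : Nat) : Int) ]
  else [0, -1, -1]

-- ===== PRECONDITION & SPEC =====
def Spec_mystere (liste : List Int) (elem : Int) (out : List Int) : Prop := out = mystere_alt liste elem
instance (liste : List Int) (elem : Int) (out : List Int) : Decidable (Spec_mystere liste elem out) := by unfold Spec_mystere; infer_instance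

-- ===== CLAIM (what is proved, stated in full; the proofs are below) =====
def Claim_equal_mystere : Prop := ∀ (liste : List Int) (elem : Int), Dom_mystere liste elem → Spec_mystere liste elem (mystere liste elem)

-- ===== LEMMAS AND PROOFS =====

-- Characterisation of A's fused loop: count / first index / last index.
theorem mystere_loop_spec (liste : List Int) (elem : Int) :
    (PySem.List.pyRange 0 (PySem.List.len liste) 1).foldl
      (fun (resultat : Int × Int × Int) i =>
        if PySem.List.pyGetD liste i 0 = elem then
          (resultat.1 + 1, (if resultat.2.1 = -1 then i else resultat.2.1), i)
        else resultat)
      (0, -1, -1)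
    = ((liste.count elem : Int),
       (match PySem.List.index? liste elem with | some k => (k : Int) | none => -1),
       (match PySem.List.index? liste.reverse elem with
        | some k => (liste.length : Int) - 1 - (k : Int) | none => -1)) := by
  induction liste using List.reverseRecOn with
  | nil =>
    simp [PySem.List.pyRange_one_eq_nil (le_refl (0:Int))]
  | append_singleton xs x ih =>
    have hn : (0:Int) ≤ (xs.length : Int) := Int.natCast_nonneg _
    have hstep : PySem.List.pyRange 0 (PySem.List.len (xs ++ [x])) 1
        = PySem.List.pyRange 0 (xs.length : Int) 1 ++ [(xs.length : Int)] := by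
      have h1 : PySem.List.len (xs ++ [x]) = (xs.length : Int) + 1 := by
        rw [PySem.List.len_eq]; push_cast [List.length_append, List.length_singleton]; ring
      rw [h1, PySem.List.pyRange_one_succ_right hn]
    rw [hstep, List.foldl_append]
    have hc : (PySem.List.pyRange 0 (xs.length : Int) 1).foldl
        (fun (resultat : Int × Int × Int) i =>
          if PySem.List.pyGetD (xs ++ [x]) i 0 = elem then
            (resultat.1 + 1, (if resultat.2.1 = -1 then i else resultat.2.1), i)
          else resultat) (0, -1, -1)
        = (PySem.List.pyRange 0 (xs.length : Int) 1).foldl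
        (fun (resultat : Int × Int × Int) i =>
          if PySem.List.pyGetD xs i 0 = elem then
            (resultat.1 + 1, (if resultat.2.1 = -1 then i else resultat.2.1), i)
          else resultat) (0, -1, -1) := by
      apply PySem.List.foldl_congr_mem
      intro acc i hi
      obtain ⟨h0, h1⟩ := (PySem.List.mem_pyRange_one).mp hi
      have hlt' : i < ((xs ++ [x]).length : Int) := by
        push_cast [List.length_append]; omega
      have hgd : PySem.List.pyGetD (xs ++ [x]) i 0 = PySem.List.pyGetD xs i 0 := by
        rw [PySem.List.pyGetD_eq_getElem (xs ++ [x]) 0 h0 hlt',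
            PySem.List.pyGetD_eq_getElem xs 0 h0 h1]
        exact List.getElem_append_left (by omega)
      rw [hgd]
    rw [hc]
    rw [PySem.List.len_eq] at ih
    rw [ih]
    have hlast : PySem.List.pyGetD (xs ++ [x]) (xs.length : Int) 0 = x := by
      rw [PySem.List.pyGetD_natCast]
      simp
    simp only [List.foldl_cons, List.foldl_nil]
    rw [hlast]
    by_cases hx : x = elem
    · subst hx
      by_cases hmem : x ∈ xs
      · obtain ⟨k, hk⟩ := Option.isSome_iff_exists.mp
          ((PySem.List.index?_isSome_iff xs x).mpr hmem)
        have hfst : PySem.List.index? (xs ++ [x]) x = some k := by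
          rw [PySem.List.index?_append_of_mem _ hmem, hk]
        have hrev : PySem.List.index? (xs ++ [x]).reverse x = some 0 := by
          rw [List.reverse_append, List.reverse_singleton, List.singleton_append]
          exact PySem.List.index?_cons_self ..
        obtain ⟨k', hk'⟩ := Option.isSome_iff_exists.mp
          ((PySem.List.index?_isSome_iff xs.reverse x).mpr (List.mem_reverse.mpr hmem))
        have hkne : ((k : Int)) ≠ -1 := by omega
        rw [if_pos rfl]
        simp only [hk, hfst, hrev, List.count_append, List.length_append, Prod.mk.injEq]
        refine ⟨by push_cast; simp, by simp [hkne], by push_cast [List.length_singleton]; simp⟩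
      · have hk : PySem.List.index? xs x = none :=
          (PySem.List.index?_eq_none_iff xs x).mpr hmem
        have hk2 : PySem.List.index? xs.reverse x = none :=
          (PySem.List.index?_eq_none_iff xs.reverse x).mpr (by simpa using hmem)
        have hfst : PySem.List.index? (xs ++ [x]) x = some xs.length :=
          PySem.List.index?_append_singleton_self xs x hmem
        have hrev : PySem.List.index? (xs ++ [x]).reverse x = some 0 := by
          rw [List.reverse_append, List.reverse_singleton, List.singleton_append]
          exact PySem.List.index?_cons_self ..
        rw [if_pos rfl]
        simp only [hk, hfst, hrev, List.count_append, List.length_append, Prod.mk.injEq]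
        refine ⟨by push_cast; simp [List.count_eq_zero_of_not_mem hmem], by simp, by push_cast [List.length_singleton]; simp⟩
    · have hcond : ¬ (x = elem) := hx
      have hxne : x ≠ elem := hx
      have hcount : ((xs ++ [x]).count elem : Int) = (xs.count elem : Int) := by
        rw [List.count_append]
        simp [hxne]
      have hfst : PySem.List.index? (xs ++ [x]) elem = PySem.List.index? xs elem := by
        by_cases hmem : elem ∈ xs
        · exact PySem.List.index?_append_of_mem _ hmem
        · rw [(PySem.List.index?_eq_none_iff xs elem).mpr hmem,
              (PySem.List.index?_eq_none_iff (xs ++ [x]) elem).mpr (by simp [hmem, Ne.symm hxne])]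
      have hrev : PySem.List.index? (xs ++ [x]).reverse elem
          = (PySem.List.index? xs.reverse elem).map (· + 1) := by
        rw [List.reverse_append]
        simp only [List.reverse_singleton, List.singleton_append]
        exact PySem.List.index?_cons_of_ne _ hxne
      rw [if_neg hcond, hcount, hfst, hrev]
      simp only [Prod.mk.injEq, true_and]
      cases h : PySem.List.index? xs.reverse elem with
      | none => simp
      | some k => simp [List.length_append]; ring

-- ===== VERDICT (by name: the statement is the Claim_ definition above) =====
theorem mystere_spec : Claim_equal_mystere := by
  intro liste elem _hd
  show mystere liste elem = mystere_alt liste elem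
  unfold mystere mystere_alt
  rw [mystere_loop_spec]
  by_cases hmem : elem ∈ liste
  · obtain ⟨k, hk⟩ := Option.isSome_iff_exists.mp ((PySem.List.index?_isSome_iff liste elem).mpr hmem)
    obtain ⟨k', hk'⟩ := Option.isSome_iff_exists.mp
      ((PySem.List.index?_isSome_iff liste.reverse elem).mpr (List.mem_reverse.mpr hmem))
    rw [PySem.List.index?_eq_idxOf?] at hk hk'
    simp [hmem, hk, hk', PySem.List.count_eq, PySem.List.len_eq]
  · have h1 : PySem.List.index? liste elem = none :=
      (PySem.List.index?_eq_none_iff liste elem).mpr hmem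
    have h2 : PySem.List.index? liste.reverse elem = none :=
      (PySem.List.index?_eq_none_iff liste.reverse elem).mpr (by simpa using hmem)
    rw [PySem.List.index?_eq_idxOf?] at h1 h2
    simp [hmem, h1, h2, List.count_eq_zero_of_not_mem hmem]
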